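-- pv_equiv track=rewrite | github.com/TheRealAt0th3T/CS437_537 | P2/snippets.py | getAppear
-- ===== SOURCE A (Python) =====
-- def getAppear(query, sentences):
--     count = 0
--     for q in query.split(" "):
--         for s in sentences:
--             if s.split(" ").count(q) != 0:
--                 count += 1
--                 continue
--     return count
-- ===== SOURCE B (Python) =====
-- def getAppear(query, sentences):
--     # Build word -> number-of-sentences-containing-it once, then sum over query words.
--     freq = {}
--     for s in sentences:
--         for w in set(s.split(" ")):
--             freq[w] = freq.get(w, 0) + 1
--     return sum(freq.get(q, 0) for q in query.split(" "))
-- ===== Notes on version B (the rewrite author's own statement) =====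
-- stated objective: alternative
-- what changed: Replaces A's nested query-word x sentence x sentence-word scan by one pass that builds a word-to-sentence-count dictionary from each sentence's word set, then sums dictionary lookups over the query words.
import Mathlib
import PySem

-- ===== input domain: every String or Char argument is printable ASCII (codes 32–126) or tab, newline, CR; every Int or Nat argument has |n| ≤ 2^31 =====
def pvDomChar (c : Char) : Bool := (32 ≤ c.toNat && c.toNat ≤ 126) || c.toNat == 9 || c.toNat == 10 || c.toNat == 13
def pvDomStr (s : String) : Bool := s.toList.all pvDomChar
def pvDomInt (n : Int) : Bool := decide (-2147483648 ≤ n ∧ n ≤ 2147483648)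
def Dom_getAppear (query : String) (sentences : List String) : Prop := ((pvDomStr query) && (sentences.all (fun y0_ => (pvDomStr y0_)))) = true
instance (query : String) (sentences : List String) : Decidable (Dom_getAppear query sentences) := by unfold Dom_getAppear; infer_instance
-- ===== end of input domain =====

-- B replaces A's nested query×sentence×words scan by a single word→sentence-count dictionary pass (objective: alternative; not measured faster).

-- ===== PORT A =====
-- s.split(" ") (shared wrapper; PySem.Chars.splitOn is exact for a nonempty separator)
def pySplit (s : String) : List (List Char) := PySem.Chars.splitOn s.toList [' ']

def getAppear (query : String) (sentences : List String) : Int :=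
  (pySplit query).foldl (fun count q =>
    sentences.foldl (fun count s =>
      if PySem.List.count (pySplit s) q ≠ 0 then count + 1 else count) count) 0

-- ===== PORT B =====
-- B's first pass: the word → number-of-sentences-containing-it dictionary
def pyFreq (sentences : List String) : PySem.Dict (List Char) Int :=
  sentences.foldl (fun d s =>
    (PySem.Set.ofList (pySplit s)).foldl
      (fun d w => d.insert w (d.getD w 0 + 1)) d) PySem.Dict.empty

def getAppear_alt (query : String) (sentences : List String) : Int :=
  (pySplit query).foldl (fun acc q => acc + (pyFreq sentences).getD q 0) 0

-- ===== PRECONDITION & SPEC =====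
def Spec_getAppear (query : String) (sentences : List String) (out : Int) : Prop := out = getAppear_alt query sentences
instance (query : String) (sentences : List String) (out : Int) : Decidable (Spec_getAppear query sentences out) := by unfold Spec_getAppear; infer_instance

-- ===== CLAIM (what is proved, stated in full; the proofs are below) =====
def Claim_equal_getAppear : Prop := ∀ (query : String) (sentences : List String), Dom_getAppear query sentences → Spec_getAppear query sentences (getAppear query sentences)

-- ===== LEMMAS AND PROOFS =====

-- the dictionary B builds maps q to the number of sentences whose word list contains q
theorem pv_freq_getD (sentences : List String) (d : PySem.Dict (List Char) Int) (q : List Char) :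
    (sentences.foldl (fun d s =>
      (PySem.Set.ofList (pySplit s)).foldl
        (fun d w => d.insert w (d.getD w 0 + 1)) d) d).getD q 0
    = d.getD q 0 + (sentences.countP (fun s => decide (q ∈ pySplit s)) : Int) := by
  induction sentences generalizing d with
  | nil => simp
  | cons s rest ih =>
    simp only [List.foldl_cons, List.countP_cons, ih, PySem.Dict.getD_foldl_insert_add_one]
    have hcnt : (PySem.Set.ofList (pySplit s)).count q
        = if q ∈ pySplit s then 1 else 0 := by
      rw [List.Nodup.count (PySem.Set.nodup_ofList (pySplit s))]
      simp [PySem.Set.mem_ofList]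
    rw [hcnt]
    by_cases h : q ∈ pySplit s <;> simp [h]
    ring

-- A's inner loop over the sentences adds exactly that count
theorem pv_inner (sentences : List String) (q : List Char) (c : Int) :
    sentences.foldl (fun count s =>
      if PySem.List.count (pySplit s) q ≠ 0 then count + 1 else count) c
    = c + (sentences.countP (fun s => decide (q ∈ pySplit s)) : Int) := by
  rw [PySem.List.foldl_ite_add_one]
  congr 2
  apply List.countP_congr
  intro s _
  simp [PySem.List.count, List.count_eq_zero]

-- ===== VERDICT (by name: the statement is the Claim_ definition above) =====
theorem getAppear_spec : Claim_equal_getAppear := by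
  intro query sentences _
  unfold Spec_getAppear getAppear getAppear_alt
  apply PySem.List.foldl_congr_mem
  intro acc q _
  rw [pv_inner]
  unfold pyFreq
  rw [pv_freq_getD]
  simp
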